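-- pv_equiv track=rewrite | github.com/eliotweber2/AoC2025 | P1/P1A.py | state_generator
-- ===== SOURCE A (Python) =====
-- def state_generator(rot_lst):
--     state = 50
--     for rot in rot_lst:
--         if rot[0] == "L":
--             state -= rot[1]
--             state += 100
--         else:
--             state += rot[1]
--         state %= 100
--         yield state
-- ===== SOURCE B (Python) =====
-- def state_generator(rot_lst):
--     # signed deltas for each rotation
--     deltas = [-amt if d == "L" else amt for d, amt in rot_lst]
--     # grand total after all rotations
--     total = 50 + sum(deltas)
--     # build the answer back-to-front: walk deltas in reverse, peeling each
--     # delta off the suffix total, so out[k] is the state after n-k rotations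
--     out = []
--     for d in reversed(deltas):
--         out.append(total % 100)
--         total -= d
--     yield from reversed(out)
-- ===== Notes on version B (the rewrite author's own statement) =====
-- stated objective: alternative
-- what changed: B first computes the grand total of all signed deltas and then builds the output back-to-front, walking the deltas in reverse and subtracting each from a suffix total, instead of A's forward loop that re-reduces a running state mod 100 at every step.
import Mathlib
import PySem

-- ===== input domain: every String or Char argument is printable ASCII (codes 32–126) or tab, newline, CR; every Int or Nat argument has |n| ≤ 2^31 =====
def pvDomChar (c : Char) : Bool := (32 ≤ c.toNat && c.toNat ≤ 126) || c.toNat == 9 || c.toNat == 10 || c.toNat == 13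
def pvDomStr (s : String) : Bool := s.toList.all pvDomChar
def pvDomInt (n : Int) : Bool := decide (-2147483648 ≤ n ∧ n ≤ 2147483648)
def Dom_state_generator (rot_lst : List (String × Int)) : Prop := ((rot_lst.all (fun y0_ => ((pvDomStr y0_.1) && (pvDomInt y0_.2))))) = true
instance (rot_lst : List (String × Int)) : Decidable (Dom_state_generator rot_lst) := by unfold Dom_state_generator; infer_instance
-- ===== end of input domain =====

-- B computes the grand total of signed deltas once and builds the output back-to-front from a suffix total (alternative decomposition, same cost).


-- ===== PORT A =====
-- one loop iteration of A: branch, ±rot.2 (+100 on "L"), then state %= 100; yields the state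
def pvStepA (acc : List Int × Int) (rot : String × Int) : List Int × Int :=
  let state := if rot.1 == "L" then acc.2 - rot.2 + 100 else acc.2 + rot.2
  let state := PySem.Int.mod state 100
  (acc.1 ++ [state], state)

def state_generator (rot_lst : List (String × Int)) : List Int :=
  (rot_lst.foldl pvStepA ([], 50)).1

-- ===== PORT B =====
-- reverse-walk loop of Source B: out.append(total % 100); total -= d
def pvStepB (acc : List Int × Int) (d : Int) : List Int × Int :=
  (acc.1 ++ [PySem.Int.mod acc.2 100], acc.2 - d)

def state_generator_alt (rot_lst : List (String × Int)) : List Int :=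
  let deltas := rot_lst.map (fun r => if r.1 == "L" then -r.2 else r.2)
  let total := 50 + deltas.sum
  ((deltas.reverse.foldl pvStepB ([], total)).1).reverse

-- ===== PRECONDITION & SPEC =====
def Spec_state_generator (rot_lst : List (String × Int)) (out : List Int) : Prop := out = state_generator_alt rot_lst
instance (rot_lst : List (String × Int)) (out : List Int) : Decidable (Spec_state_generator rot_lst out) := by unfold Spec_state_generator; infer_instance

-- ===== CLAIM (what is proved, stated in full; the proofs are below) =====
def Claim_equal_state_generator : Prop := ∀ (rot_lst : List (String × Int)), Dom_state_generator rot_lst → Spec_state_generator rot_lst (state_generator rot_lst)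

-- ===== LEMMAS AND PROOFS =====

-- raw (un-modded) running totals seeded at t
def pvRawTotals (t : Int) : List Int → List Int
  | [] => []
  | d :: ds => (t + d) :: pvRawTotals (t + d) ds

lemma pv_mod_absorb (t d : Int) :
    PySem.Int.mod (PySem.Int.mod t 100 + d) 100 = PySem.Int.mod (t + d) 100 := by
  have h : ∀ a : Int, PySem.Int.mod a 100 = a % 100 := fun a => PySem.Int.mod_eq_emod_of_pos (by norm_num)
  rw [h, h, h]; omega

lemma pv_mod_absorb_L (t d : Int) :
    PySem.Int.mod (PySem.Int.mod t 100 - d + 100) 100 = PySem.Int.mod (t + -d) 100 := by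
  have h : ∀ a : Int, PySem.Int.mod a 100 = a % 100 := fun a => PySem.Int.mod_eq_emod_of_pos (by norm_num)
  rw [h, h, h]; omega

-- A's fold yields the modded raw totals of the signed deltas
lemma pv_keyA (l : List (String × Int)) : ∀ (t : Int) (p : List Int),
    (l.foldl pvStepA (p, PySem.Int.mod t 100)).1 =
      p ++ (pvRawTotals t (l.map (fun r => if r.1 == "L" then -r.2 else r.2))).map
        (fun x => PySem.Int.mod x 100) := by
  induction l with
  | nil => intro t p; simp [pvRawTotals]
  | cons r l ih =>
    intro t p
    simp only [List.map_cons, List.foldl_cons, pvRawTotals]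
    by_cases hL : r.1 == "L"
    · have := ih (t + -r.2) (p ++ [PySem.Int.mod (t + -r.2) 100])
      simpa [pvStepA, hL, pv_mod_absorb_L] using this
    · have := ih (t + r.2) (p ++ [PySem.Int.mod (t + r.2) 100])
      simpa [pvStepA, hL, pv_mod_absorb] using this

-- B's reverse fold from the grand total produces the reversed modded raw totals
lemma pv_keyB (ds : List Int) : ∀ (t : Int) (p : List Int),
    ds.reverse.foldl pvStepB (p, t + ds.sum) =
      (p ++ ((pvRawTotals t ds).map (fun x => PySem.Int.mod x 100)).reverse, t) := by
  induction ds with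
  | nil => intro t p; simp [pvRawTotals]
  | cons d ds ih =>
    intro t p
    have h : t + (d :: ds).sum = (t + d) + ds.sum := by simp [List.sum_cons]; ring
    rw [List.reverse_cons, List.foldl_append, h, ih (t + d) p]
    simp [pvStepB, pvRawTotals]

-- ===== VERDICT (by name: the statement is the Claim_ definition above) =====
theorem state_generator_spec : Claim_equal_state_generator := by
  intro rot_lst _
  show state_generator rot_lst = state_generator_alt rot_lst
  have hB : state_generator_alt rot_lst =
      (pvRawTotals 50 (rot_lst.map (fun r => if r.1 == "L" then -r.2 else r.2))).map
        (fun x => PySem.Int.mod x 100) := by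
    unfold state_generator_alt
    dsimp only
    rw [pv_keyB _ 50 []]
    simp
  rw [hB]
  unfold state_generator
  conv_lhs => rw [show (50 : Int) = PySem.Int.mod 50 100 by decide]
  rw [pv_keyA]
  simp
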